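-- pv_equiv track=rewrite | github.com/vince-xunzhe/Knowra | backend/services/wiki_compiler.py | _pick_preferred_page
-- ===== SOURCE A (Python) =====
-- from typing import Any, List, Optional, Tuple
--
-- def _pick_preferred_page(entries: List[dict], expected_name: Optional[str] = None) -> Optional[dict]:
--     if not entries:
--         return None
--     if expected_name:
--         for entry in entries:
--             if entry.get("filename") == expected_name:
--                 return entry
--     return max(
--         entries,
--         key=lambda entry: (
--             str(entry.get("compiled_at") or ""),
--             str(entry.get("filename") or ""),
--         ),
--     )
-- ===== SOURCE B (Python) =====
-- def _pick_preferred_page(entries, expected_name=None):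
--     if not entries:
--         return None
--     if expected_name:
--         matches = [e for e in entries if e.get("filename") == expected_name]
--         if matches:
--             return matches[0]
--     return sorted(
--         entries,
--         key=lambda e: (str(e.get("compiled_at") or ""), str(e.get("filename") or "")),
--         reverse=True,
--     )[0]
-- ===== Notes on version B (the rewrite author's own statement) =====
-- stated objective: alternative
-- what changed: Replaces A's early-return scan + max() running-max with a filter comprehension for the name match and a stable reverse sort by the key tuple whose first element is the preferred page (stability reproduces max's first-winner tie-breaking).
import Mathlib
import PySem

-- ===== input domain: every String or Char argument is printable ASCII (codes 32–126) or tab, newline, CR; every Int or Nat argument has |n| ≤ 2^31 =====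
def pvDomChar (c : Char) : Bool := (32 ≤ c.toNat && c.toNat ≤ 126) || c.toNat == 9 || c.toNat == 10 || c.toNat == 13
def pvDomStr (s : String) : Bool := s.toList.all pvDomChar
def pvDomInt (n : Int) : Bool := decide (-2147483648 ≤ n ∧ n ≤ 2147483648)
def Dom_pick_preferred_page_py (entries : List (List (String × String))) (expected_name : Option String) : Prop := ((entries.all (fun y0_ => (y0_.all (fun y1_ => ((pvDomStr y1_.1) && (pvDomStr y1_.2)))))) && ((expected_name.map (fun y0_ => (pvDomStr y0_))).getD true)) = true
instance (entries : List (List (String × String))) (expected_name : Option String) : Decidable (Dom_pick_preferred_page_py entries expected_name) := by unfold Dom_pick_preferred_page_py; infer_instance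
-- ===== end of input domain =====

-- B replaces A's early-return scan + max() with a filter comprehension and a stable reverse sort whose first element is the preferred page (alternative decomposition, same results).

-- ===== PORT A =====
-- the key tuple (str(entry.get("compiled_at") or ""), str(entry.get("filename") or ""))
def pvKey (e : List (String × String)) : String × String :=
  ((List.lookup "compiled_at" e).getD "", (List.lookup "filename" e).getD "")

-- Python's strict tuple comparison a > b (lexicographic)
def pvGt (a b : String × String) : Bool :=
  decide (b.1 < a.1) || (a.1 == b.1 && decide (b.2 < a.2))

-- A's early-return scan over entries
def pickA_scan (name : String) : List (List (String × String)) → Option (List (String × String))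
  | [] => none
  | e :: es => if List.lookup "filename" e = some name then some e else pickA_scan name es

-- A's max(entries, key=…): CPython's running-max loop (strict >, first maximum kept)
def pickA_max (e : List (String × String)) (es : List (List (String × String))) : List (String × String) :=
  es.foldl (fun b x => if pvGt (pvKey x) (pvKey b) then x else b) e

def pick_preferred_page_py (entries : List (List (String × String))) (expected_name : Option String) : Option (List (String × String)) :=
  match entries with
  | [] => none
  | e :: es =>
    match expected_name with
    | some name =>
      if name ≠ "" then
        match pickA_scan name (e :: es) with
        | some f => some f
        | none => some (pickA_max e es)
      else some (pickA_max e es)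
    | none => some (pickA_max e es)

-- ===== PORT B =====
-- B's two sort-key components: str(e.get("compiled_at") or "") and str(e.get("filename") or "")
def pvK1 (e : List (String × String)) : String := (List.lookup "compiled_at" e).getD ""
def pvK2 (e : List (String × String)) : String := (List.lookup "filename" e).getD ""

-- sorted(entries, key=…, reverse=True)[0]; entries is nonempty here, so [0] is head?
def pickB_sortedHead (entries : List (List (String × String))) : Option (List (String × String)) :=
  (PySem.List.sorted2 entries pvK1 pvK2 true).head?

def pick_preferred_page_py_alt (entries : List (List (String × String))) (expected_name : Option String) : Option (List (String × String)) :=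
  match entries with
  | [] => none
  | _ :: _ =>
    match expected_name with
    | some name =>
      if name ≠ "" then
        -- matches = [e for e in entries if e.get("filename") == expected_name]; if matches: return matches[0]
        match (entries.filter (fun e => List.lookup "filename" e == some name)).head? with
        | some m => some m
        | none => pickB_sortedHead entries
      else pickB_sortedHead entries
    | none => pickB_sortedHead entries

-- ===== PRECONDITION & SPEC =====
def Spec_pick_preferred_page_py (entries : List (List (String × String))) (expected_name : Option String) (out : Option (List (String × String))) : Prop := out = pick_preferred_page_py_alt entries expected_name
instance (entries : List (List (String × String))) (expected_name : Option String) (out : Option (List (String × String))) : Decidable (Spec_pick_preferred_page_py entries expected_name out) := by unfold Spec_pick_preferred_page_py; infer_instance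

-- ===== CLAIM =====
def Claim_equal_pick_preferred_page_py : Prop := ∀ (entries : List (List (String × String))) (expected_name : Option String), Dom_pick_preferred_page_py entries expected_name → Spec_pick_preferred_page_py entries expected_name (pick_preferred_page_py entries expected_name)

-- ===== LEMMAS AND PROOFS =====

-- A's scan is head-of-filter
theorem pickA_scan_eq_filter_head (name : String) (l : List (List (String × String))) :
    pickA_scan name l = (l.filter (fun e => List.lookup "filename" e == some name)).head? := by
  induction l with
  | nil => rfl
  | cons x xs ih =>
    by_cases hx : List.lookup "filename" x = some name
    · have hb : (List.lookup "filename" x == some name) = true := by simpa using hx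
      simp [pickA_scan, hx]
    · have hb : (List.lookup "filename" x == some name) = false := by simpa using hx
      simp [pickA_scan, hx, hb, ih]

-- sorted2's reverse "before" test coincides with Python's strict tuple > on the key
theorem pvBefore_eq (a b : List (String × String)) :
    (decide (pvK1 b < pvK1 a) || (!decide (pvK1 a < pvK1 b) && decide (pvK2 b < pvK2 a)))
      = pvGt (pvKey a) (pvKey b) := by
  show _ = (decide (pvK1 b < pvK1 a) || ((pvK1 a == pvK1 b) && decide (pvK2 b < pvK2 a)))
  rcases lt_trichotomy (pvK1 a) (pvK1 b) with h | h | h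
  · have h1 : ¬ pvK1 b < pvK1 a := not_lt_of_gt h
    have h2 : (pvK1 a == pvK1 b) = false := by simp [ne_of_lt h]
    simp [h, h1, h2]
  · simp [h]
  · simp [h, not_lt_of_gt h]

-- head of an insertion step is the running-max step
theorem head?_insertBy (gt : List (String × String) → List (String × String) → Bool)
    (x y : List (String × String)) (ys : List (List (String × String))) :
    (PySem.List.insertBy gt x (y :: ys)).head? = some (if gt x y then x else y) := by
  by_cases h : gt x y <;> simp [PySem.List.insertBy, h]

-- head of the whole insertion-sort fold is the running max
theorem head?_foldl_insertBy (gt : List (String × String) → List (String × String) → Bool) :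
    ∀ (xs : List (List (String × String))) (y : List (String × String)) (acc : List (List (String × String))),
      acc.head? = some y →
      ((xs.foldl (fun a x => PySem.List.insertBy gt x a) acc).head?
        = some (xs.foldl (fun b x => if gt x b then x else b) y)) := by
  intro xs
  induction xs with
  | nil => intro y acc h; simpa using h
  | cons x xs ih =>
    intro y acc h
    cases acc with
    | nil => simp at h
    | cons y' ys =>
      have hy : y' = y := by simpa using h
      subst hy
      simp only [List.foldl_cons]
      exact ih _ _ (head?_insertBy gt x y' ys)

-- B's sorted(...)[0] on a nonempty list is A's running max
theorem pickB_sortedHead_eq (e : List (String × String)) (es : List (List (String × String))) :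
    pickB_sortedHead (e :: es) = some (pickA_max e es) := by
  unfold pickB_sortedHead PySem.List.sorted2
  have hf : (fun a b => decide (pvK1 b < pvK1 a) || (!decide (pvK1 a < pvK1 b) && decide (pvK2 b < pvK2 a)))
      = (fun a b => pvGt (pvKey a) (pvKey b)) := by
    funext a b; exact pvBefore_eq a b
  simp only [if_true, List.foldl_cons, hf]
  rw [show (PySem.List.insertBy (fun a b => pvGt (pvKey a) (pvKey b)) e
        ([] : List (List (String × String)))) = [e] from rfl]
  rw [head?_foldl_insertBy (fun a b => pvGt (pvKey a) (pvKey b)) es e [e] rfl]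
  rfl

-- ===== VERDICT =====
theorem pick_preferred_page_py_spec : Claim_equal_pick_preferred_page_py := by
  intro entries expected_name _
  unfold Spec_pick_preferred_page_py pick_preferred_page_py pick_preferred_page_py_alt
  match entries with
  | [] => rfl
  | e :: es =>
    simp only [pickB_sortedHead_eq]
    match expected_name with
    | none => rfl
    | some name =>
      by_cases h : name = ""
      · subst h; simp
      · simp only [if_pos (by exact h : name ≠ ""), pickA_scan_eq_filter_head]
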